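-- pv_equiv track=rewrite | github.com/miliar/Code_Jam_Webscraper | solutions_python/solutions_year15_round0_nr1/2312.py | cal_status
-- ===== SOURCE A (Python) =====
-- def cal_status (max_level, status):
--     stands = int(status[0]);
--     require = 0;
--     for i in range(1, max_level+1):
--         if (stands >= i) :
--             stands = stands + int(status[i]);
--         else:
--             diff = i - stands;
--             stands = stands + int(status[i]) + diff;
--             require = require + diff;
--
--     return require;
-- ===== SOURCE B (Python) =====
-- def cal_status(max_level, status):
--     require = 0
--     prefix = int(status[0])
--     for i in range(1, max_level + 1):
--         need = i - prefix
--         if need > require: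
--             require = need
--         prefix += int(status[i])
--     return require
-- ===== Notes on version B (the rewrite author's own statement) =====
-- stated objective: simpler
-- what changed: B replaces A's self-feeding accumulator (stands is topped up by the deficit it just caused, and require sums those top-ups) with a running prefix sum of the raw star counts and a running maximum of the deficits i - prefix, dropping the stands/diff feedback loop entirely.
import Mathlib
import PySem

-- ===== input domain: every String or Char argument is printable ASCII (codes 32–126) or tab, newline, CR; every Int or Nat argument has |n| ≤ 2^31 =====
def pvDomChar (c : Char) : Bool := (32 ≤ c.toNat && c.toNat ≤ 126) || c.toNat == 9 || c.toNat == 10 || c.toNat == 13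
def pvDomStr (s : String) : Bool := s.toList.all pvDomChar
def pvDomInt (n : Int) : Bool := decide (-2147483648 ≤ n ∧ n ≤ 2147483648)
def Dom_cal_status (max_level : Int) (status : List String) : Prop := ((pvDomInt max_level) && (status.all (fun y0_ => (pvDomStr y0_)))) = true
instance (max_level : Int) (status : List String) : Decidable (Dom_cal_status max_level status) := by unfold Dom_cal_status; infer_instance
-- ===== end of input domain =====

-- B replaces A's self-feeding accumulator with a running prefix sum and a running max of deficits (simpler decomposition, same cost).

-- int(status[i]) under Pre_ (which guarantees the index is in range and the string parses)
def pvVal (status : List String) (i : Int) : Int :=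
  ((PySem.List.pyGet? status i).bind PySem.Int.ofStr?).getD 0

-- ===== PORT A =====
-- state (stands, require); loop over range(1, max_level+1)
def cal_status (max_level : Int) (status : List String) : Int :=
  let stands := pvVal status 0
  let st := (PySem.List.pyRange 1 (max_level + 1) 1).foldl
    (fun (st : Int × Int) (i : Int) =>
      if st.1 ≥ i then
        (st.1 + pvVal status i, st.2)
      else
        let diff := i - st.1
        (st.1 + pvVal status i + diff, st.2 + diff))
    (stands, 0)
  st.2

-- ===== PORT B =====
-- state (require, prefix); require = running max of the deficits i - prefix
def cal_status_alt (max_level : Int) (status : List String) : Int :=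
  let st := (PySem.List.pyRange 1 (max_level + 1) 1).foldl
    (fun (st : Int × Int) (i : Int) =>
      let need := i - st.2
      ((if need > st.1 then need else st.1), st.2 + pvVal status i))
    (0, pvVal status 0)
  st.1

-- ===== PRECONDITION & SPEC =====
-- Pre_ excludes exactly the inputs where Python A raises: an empty status (IndexError on
-- status[0]), max_level ≥ len(status) (IndexError in the loop), or a needed entry that
-- int() cannot parse (ValueError).
def Pre_cal_status (max_level : Int) (status : List String) : Prop :=
  status ≠ [] ∧ max_level < (status.length : Int) ∧
    ∀ s ∈ status.take (max_level.toNat + 1), (PySem.Int.ofStr? s).isSome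
instance (max_level : Int) (status : List String) : Decidable (Pre_cal_status max_level status) := by
  unfold Pre_cal_status; infer_instance

def pvWitness_cal_status : Int × List String := (3, ["1", "1", "1", "1"])

def Spec_cal_status (max_level : Int) (status : List String) (out : Int) : Prop := out = cal_status_alt max_level status
instance (max_level : Int) (status : List String) (out : Int) : Decidable (Spec_cal_status max_level status out) := by unfold Spec_cal_status; infer_instance

-- ===== CLAIM (what is proved, stated in full; the proofs are below) =====
def Claim_equal_cal_status : Prop := ∀ (max_level : Int) (status : List String), Dom_cal_status max_level status → Pre_cal_status max_level status → Spec_cal_status max_level status (cal_status max_level status)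

-- ===== LEMMAS AND PROOFS =====

-- Invariant: A's state is (prefix + require, require) exactly when B's state is (require, prefix).
theorem pv_fold_inv (f : Int → Int) (l : List Int) :
    ∀ (p r : Int),
      (l.foldl
        (fun (st : Int × Int) (i : Int) =>
          if st.1 ≥ i then (st.1 + f i, st.2)
          else
            let diff := i - st.1
            (st.1 + f i + diff, st.2 + diff))
        (p + r, r)).2 =
      (l.foldl
        (fun (st : Int × Int) (i : Int) =>
          let need := i - st.2
          ((if need > st.1 then need else st.1), st.2 + f i))
        (r, p)).1 := by
  induction l with
  | nil => intro p r; rfl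
  | cons i t ih =>
    intro p r
    simp only [List.foldl_cons]
    by_cases h : p + r ≥ i
    · rw [if_pos h, if_neg (by omega)]
      have : p + r + f i = (p + f i) + r := by ring
      rw [this]
      exact ih (p + f i) r
    · rw [if_neg h, if_pos (by omega)]
      have h1 : p + r + f i + (i - (p + r)) = (p + f i) + (i - p) := by ring
      have h2 : r + (i - (p + r)) = i - p := by ring
      rw [h1, h2]
      exact ih (p + f i) (i - p)

theorem cal_status_eq_alt (max_level : Int) (status : List String) :
    cal_status max_level status = cal_status_alt max_level status := by
  unfold cal_status cal_status_alt
  have := pv_fold_inv (pvVal status) (PySem.List.pyRange 1 (max_level + 1) 1)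
    (pvVal status 0) 0
  simpa using this

-- ===== VERDICT (by name: the statement is the Claim_ definition above) =====
theorem cal_status_spec : Claim_equal_cal_status := by
  intro max_level status _ _
  exact cal_status_eq_alt max_level status
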